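-- pv_equiv track=rewrite | github.com/MoreDeniz/BOT_TEST | keyboards/inline/search_navigation.py | create_select_list
-- ===== SOURCE A (Python) =====
-- def create_select_list(target_list: list) -> list:
--     menu_list = []
--     target_list = list(map(lambda x: x[0], target_list))
--     for item in target_list:
--         menu_list.append(item)
--     sorted_item_list = sorted(menu_list)
--     menu_list.clear()
--     count = 0
--     row = []
--     for item in sorted_item_list:
--         if count < 6:
--             row.append(item)
--         else:
--             count = 0
--             menu_list.append(row)
--             row = [item]
--         count += 1
--     else:
--         if row:
--             menu_list.append(row)
--     return menu_list
-- ===== SOURCE B (Python) =====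
-- def create_select_list(target_list: list) -> list:
--     sorted_items = sorted(x[0] for x in target_list)
--     rows = []
--     i = 0
--     while i < len(sorted_items):
--         rows.append(sorted_items[i:i + 6])
--         i += 6
--     return rows
-- ===== Notes on version B (the rewrite author's own statement) =====
-- stated objective: simpler
-- what changed: B drops A's copy/clear shuffling and its streaming count/row accumulator: it sorts the first elements directly and chunks them into rows of six by index-stride slicing instead of carrying a partial row and counter through the loop.
import Mathlib
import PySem

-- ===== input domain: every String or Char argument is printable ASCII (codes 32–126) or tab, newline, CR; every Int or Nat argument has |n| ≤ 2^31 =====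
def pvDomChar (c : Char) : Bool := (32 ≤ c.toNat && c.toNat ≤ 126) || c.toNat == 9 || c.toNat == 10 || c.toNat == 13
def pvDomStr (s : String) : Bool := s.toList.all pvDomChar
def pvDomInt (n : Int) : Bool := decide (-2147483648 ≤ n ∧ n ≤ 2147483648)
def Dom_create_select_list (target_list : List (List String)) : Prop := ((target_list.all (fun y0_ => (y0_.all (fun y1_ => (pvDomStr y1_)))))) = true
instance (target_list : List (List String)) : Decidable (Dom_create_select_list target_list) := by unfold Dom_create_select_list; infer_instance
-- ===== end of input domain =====

-- B replaces A's copy/clear dance and streaming count/row accumulator by sorting the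
-- first elements directly and chunking them into rows of six by index-stride slicing (simpler).

-- ===== PORT A =====
-- x[0]: PySem.List.pyGet? returns none exactly where Python raises IndexError;
-- Pre_ excludes those inputs, so the .getD "" default is never reached on admitted inputs.
def create_select_list (target_list : List (List String)) : List (List String) :=
  let menu_list : List String := []
  let target_list' := target_list.map (fun x => (PySem.List.pyGet? x 0).getD "")
  let menu_list := target_list'.foldl (fun acc item => acc ++ [item]) menu_list
  let sorted_item_list := PySem.List.sorted menu_list (fun x => x) false
  -- menu_list.clear(); count = 0; row = []
  let st := sorted_item_list.foldl
    (fun (st : Int × List String × List (List String)) item =>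
      let (count, row, menu) := st
      if count < 6 then (count + 1, row ++ [item], menu)
      else (1, [item], menu ++ [row]))
    (0, [], [])
  let (_, row, menu) := st
  if row ≠ [] then menu ++ [row] else menu

-- ===== PORT B =====
-- the while loop over i: rows.append(sorted_items[i:i+6]); i += 6
def bChunkLoop (s : List String) (i : Nat) : List (List String) :=
  if i < s.length then
    PySem.List.slice s (some (i : Int)) (some ((i + 6 : Nat) : Int)) :: bChunkLoop s (i + 6)
  else []
termination_by s.length - i

def create_select_list_alt (target_list : List (List String)) : List (List String) :=
  let sorted_items := PySem.List.sorted
    (target_list.map (fun x => (PySem.List.pyGet? x 0).getD "")) (fun x => x) false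
  bChunkLoop sorted_items 0

-- ===== PRECONDITION & SPEC =====
-- Pre_ excludes exactly the inputs on which Python A raises IndexError (an empty inner list at x[0]).
def Pre_create_select_list (target_list : List (List String)) : Prop :=
  ∀ x ∈ target_list, x ≠ []
instance (target_list : List (List String)) : Decidable (Pre_create_select_list target_list) := by
  unfold Pre_create_select_list; infer_instance

def pvWitness_create_select_list : List (List String) :=
  [["b", "1"], ["a"], ["c"], ["d"], ["e"], ["f"], ["g"]]

def Spec_create_select_list (target_list : List (List String)) (out : List (List String)) : Prop := out = create_select_list_alt target_list
instance (target_list : List (List String)) (out : List (List String)) : Decidable (Spec_create_select_list target_list out) := by unfold Spec_create_select_list; infer_instance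

-- ===== CLAIM (what is proved, stated in full; the proofs are below) =====
def Claim_equal_create_select_list : Prop := ∀ (target_list : List (List String)), Dom_create_select_list target_list → Pre_create_select_list target_list → Spec_create_select_list target_list (create_select_list target_list)

-- ===== LEMMAS AND PROOFS =====

-- reference chunking: rows of six, front to back
def chunks6 (s : List String) : List (List String) :=
  if s = [] then [] else s.take 6 :: chunks6 (s.drop 6)
termination_by s.length
decreasing_by
  rename_i h
  have : s.length ≠ 0 := by simpa [List.length_eq_zero_iff] using h
  simp; omega

-- A's streaming loop (with the trailing if-row append) computes m ++ chunks6 (r ++ l)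
lemma foldA_eq_chunks6 (l : List String) :
    ∀ (r : List String) (m : List (List String)), r.length ≤ 6 →
    (let st := l.foldl
        (fun (st : Int × List String × List (List String)) item =>
          let (count, row, menu) := st
          if count < 6 then (count + 1, row ++ [item], menu)
          else (1, [item], menu ++ [row]))
        ((r.length : Int), r, m)
      let (_, row, menu) := st
      if row ≠ [] then menu ++ [row] else menu) = m ++ chunks6 (r ++ l) := by
  induction l with
  | nil =>
    intro r m h
    by_cases hr : r = []
    · subst hr; simp [chunks6]
    · simp only [List.foldl_nil, List.append_nil]
      rw [chunks6]
      have h1 : r.take 6 = r := List.take_of_length_le h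
      have h2 : r.drop 6 = [] := List.drop_eq_nil_of_le h
      simp [hr, h1, h2, chunks6]
  | cons a t ih =>
    intro r m h
    by_cases hc : r.length < 6
    · have hci : ((r.length : Int)) < 6 := by exact_mod_cast hc
      rw [List.foldl_cons]
      have e : (match ((r.length : Int), r, m) with
          | (count, row, menu) =>
            if count < 6 then (count + 1, row ++ [a], menu) else (1, [a], menu ++ [row]))
          = (((r ++ [a]).length : Int), r ++ [a], m) := by simp [hci]
      rw [e, show r ++ a :: t = (r ++ [a]) ++ t from by simp]
      exact ih (r ++ [a]) m (by simp; omega)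
    · have hr6 : r.length = 6 := by omega
      have hnotlt : ¬ ((r.length : Int) < 6) := by simp [hr6]
      have key := ih [a] (m ++ [r]) (by simp)
      rw [show ((([a] : List String).length : Int)) = 1 from by simp] at key
      have hch : chunks6 (r ++ a :: t) = r :: chunks6 (a :: t) := by
        rw [chunks6]
        have h1 : (r ++ a :: t).take 6 = r := by
          rw [List.take_append_of_le_length (by omega)]
          exact List.take_of_length_le (by omega)
        have h2 : (r ++ a :: t).drop 6 = a :: t := by
          rw [List.drop_append_of_le_length (by omega)]
          simp [hr6]
        simp [h1, h2, show r ++ a :: t ≠ [] by simp]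
      rw [List.foldl_cons]
      have e : (match ((r.length : Int), r, m) with
          | (count, row, menu) =>
            if count < 6 then (count + 1, row ++ [a], menu) else (1, [a], menu ++ [row]))
          = ((1 : Int), [a], m ++ [r]) := by simp [hnotlt]
      rw [e, hch, key]
      simp

lemma bChunkLoop_eq_chunks6 (s : List String) : ∀ i, bChunkLoop s i = chunks6 (s.drop i) := by
  intro i
  induction hn : s.length - i using Nat.strong_induction_on generalizing i with
  | _ n ih =>
    rw [bChunkLoop]
    by_cases hlt : i < s.length
    · have hne : s.drop i ≠ [] := by
        simp [List.drop_eq_nil_iff]; omega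
      have hslice : PySem.List.slice s (some (i : Int)) (some ((i + 6 : Nat) : Int))
          = (s.drop i).take 6 := by
        rw [PySem.List.slice_natCast]
        congr 1; omega
      have hdrop : (s.drop i).drop 6 = s.drop (i + 6) := by
        rw [List.drop_drop]
      rw [if_pos hlt, hslice, ih (s.length - (i + 6)) (by omega) (i + 6) rfl]
      conv_rhs => rw [chunks6]
      rw [if_neg hne, hdrop]
    · have : s.drop i = [] := by
        simp [List.drop_eq_nil_iff]; omega
      simp [hlt, this, chunks6]

-- ===== VERDICT (by name: the statement is the Claim_ definition above) =====
theorem create_select_list_spec : Claim_equal_create_select_list := by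
  intro target_list _ _
  unfold Spec_create_select_list create_select_list create_select_list_alt
  simp only []
  rw [PySem.List.foldl_append_singleton]
  rw [bChunkLoop_eq_chunks6]
  have := foldA_eq_chunks6
    (PySem.List.sorted (target_list.map (fun x => (PySem.List.pyGet? x 0).getD "")) (fun x => x) false)
    [] [] (by simp)
  simpa using this
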